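-- pv_equiv track=rewrite | github.com/ajwkant/libft | Documents/codam/advent_of_code_2021/finished_days_python/day7_2.py | find_cheapest_position
-- ===== SOURCE A (Python) =====
-- def calc_cost(distance):
-- 	cost = 0
-- 	incremental_cost = 1
-- 	for _ in range(distance):
-- 		cost += incremental_cost
-- 		incremental_cost += 1
-- 	return cost
--
-- def find_total_cost(data, pos):
-- 	total = 0
-- 	for number in data:
-- 		distance = abs(number - pos)
-- 		total += calc_cost(distance)
-- 	return total
--
-- def find_cheapest_position(data):
-- 	lowest_cost = find_total_cost(data, min(data))
-- 	cheapest_pos = min(data)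
-- 	for x in range(min(data) + 1, max(data) + 1):
-- 		cost = find_total_cost(data, x)
-- 		if cost < lowest_cost:
-- 			lowest_cost = cost
-- 			cheapest_pos = x
-- 	return lowest_cost, cheapest_pos
-- ===== SOURCE B (Python) =====
-- def find_cheapest_position(data):
-- 	s = sum(data)
-- 	n = len(data)
-- 	fl = s // n           # floor of the mean; the convex cost is minimized at floor or ceil
-- 	ce = -((-s) // n)     # ceil of the mean
--
-- 	def total(c):
-- 		return sum(d * (d + 1) // 2 for d in (abs(p - c) for p in data))
--
-- 	lowest_cost, cheapest_pos = total(fl), fl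
-- 	cost_ce = total(ce)
-- 	if cost_ce < lowest_cost:
-- 		lowest_cost, cheapest_pos = cost_ce, ce
-- 	return lowest_cost, cheapest_pos
-- ===== Notes on version B (the rewrite author's own statement) =====
-- stated objective: faster
-- what changed: Replaces the exhaustive scan of every position in [min,max] (each cost evaluated with an inner unary-counting loop) by evaluating the closed-form triangular cost at only the two candidates floor(mean) and ceil(mean), which convexity proves contains the leftmost minimizer.
-- outside the precondition, e.g. on find_cheapest_position([]): A raises ValueError, B raises ZeroDivisionError
import Mathlib
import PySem

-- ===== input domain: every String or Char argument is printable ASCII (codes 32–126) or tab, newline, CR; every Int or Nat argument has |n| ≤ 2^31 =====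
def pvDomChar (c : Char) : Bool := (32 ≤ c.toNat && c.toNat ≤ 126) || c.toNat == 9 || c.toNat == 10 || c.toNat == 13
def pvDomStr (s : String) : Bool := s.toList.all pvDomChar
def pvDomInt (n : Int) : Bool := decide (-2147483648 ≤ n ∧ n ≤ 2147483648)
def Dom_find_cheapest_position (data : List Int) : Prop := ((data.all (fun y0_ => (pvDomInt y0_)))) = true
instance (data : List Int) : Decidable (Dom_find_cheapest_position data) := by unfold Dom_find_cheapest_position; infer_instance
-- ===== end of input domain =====

-- B replaces A's exhaustive scan of [min,max] (with unary-counting inner cost loops) by the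
-- closed-form triangular cost evaluated at just floor(mean) and ceil(mean); faster.


-- ===== PORT A =====
def calc_cost (distance : Int) : Int :=
  ((PySem.List.pyRange 0 distance 1).foldl
    (fun st _ => (st.1 + st.2, st.2 + 1)) ((0 : Int), (1 : Int))).1

def find_total_cost (data : List Int) (pos : Int) : Int :=
  data.foldl (fun total number => total + calc_cost |number - pos|) 0

def find_cheapest_position (data : List Int) : Int × Int :=
  let lowest_cost := find_total_cost data ((PySem.List.min? data (fun x => x)).getD 0)
  let cheapest_pos := (PySem.List.min? data (fun x => x)).getD 0
  (PySem.List.pyRange ((PySem.List.min? data (fun x => x)).getD 0 + 1)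
      ((PySem.List.max? data (fun x => x)).getD 0 + 1) 1).foldl
    (fun st x =>
      let cost := find_total_cost data x
      if cost < st.1 then (cost, x) else st)
    (lowest_cost, cheapest_pos)

-- ===== PORT B =====
def pvTri (d : Int) : Int := PySem.Int.floordiv (d * (d + 1)) 2

def pvTotal (data : List Int) (c : Int) : Int :=
  (data.map (fun p => pvTri |p - c|)).sum

def find_cheapest_position_alt (data : List Int) : Int × Int :=
  let s := data.sum
  let n : Int := data.length
  let fl := PySem.Int.floordiv s n
  let ce := -(PySem.Int.floordiv (-s) n)
  let lowest_cost := pvTotal data fl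
  let cheapest_pos := fl
  let cost_ce := pvTotal data ce
  if cost_ce < lowest_cost then (cost_ce, ce) else (lowest_cost, cheapest_pos)

-- ===== PRECONDITION & SPEC =====
-- Pre_ excludes exactly the empty list, on which A raises ValueError (min of empty sequence).
def Pre_find_cheapest_position (data : List Int) : Prop := data ≠ []
instance (data : List Int) : Decidable (Pre_find_cheapest_position data) := by
  unfold Pre_find_cheapest_position; infer_instance

def pvWitness_find_cheapest_position : List Int := [1, 2, 5]

def Spec_find_cheapest_position (data : List Int) (out : Int × Int) : Prop := out = find_cheapest_position_alt data
instance (data : List Int) (out : Int × Int) : Decidable (Spec_find_cheapest_position data out) := by unfold Spec_find_cheapest_position; infer_instance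

-- ===== CLAIM (what is proved, stated in full; the proofs are below) =====
def Claim_equal_find_cheapest_position : Prop := ∀ (data : List Int), Dom_find_cheapest_position data → Pre_find_cheapest_position data → Spec_find_cheapest_position data (find_cheapest_position data)

-- ===== LEMMAS AND PROOFS =====

-- 2 * T(d) = d(d+1)
theorem pv_two_mul_tri (d : Int) : 2 * pvTri d = d * (d + 1) := by
  have he : Even (d * (d + 1)) := Int.even_mul_succ_self d
  have hd : (2 : Int) ∣ d * (d + 1) := he.two_dvd
  simp only [pvTri, PySem.Int.floordiv_eq_ediv_of_pos (by norm_num : (0:Int) < 2)]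
  exact Int.mul_ediv_cancel' hd

-- helper triangular recursion used to evaluate A's inner loop
def pvTriAux : Nat → Int
  | 0 => 0
  | k + 1 => pvTriAux k + (k + 1)

theorem pv_two_mul_triAux (k : Nat) : 2 * pvTriAux k = (k : Int) * (k + 1) := by
  induction k with
  | zero => simp [pvTriAux]
  | succ k ih =>
    simp only [pvTriAux]
    push_cast
    push_cast at ih
    linarith [ih]

theorem pv_calc_loop (k : Nat) :
    (PySem.List.pyRange 0 (k : Int) 1).foldl
      (fun (st : Int × Int) _ => (st.1 + st.2, st.2 + 1)) ((0 : Int), (1 : Int))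
      = (pvTriAux k, (k : Int) + 1) := by
  induction k with
  | zero => simp [pvTriAux]
  | succ k ih =>
    have h : PySem.List.pyRange 0 ((k : Int) + 1) 1
        = PySem.List.pyRange 0 (k : Int) 1 ++ [(k : Int)] :=
      PySem.List.pyRange_one_succ_right (by exact_mod_cast Int.natCast_nonneg k)
    push_cast
    rw [h, List.foldl_append, ih]
    simp only [List.foldl_cons, List.foldl_nil, pvTriAux]

theorem pv_calc_cost_eq (d : Int) (hd : 0 ≤ d) : calc_cost d = pvTri d := by
  obtain ⟨k, rfl⟩ := Int.eq_ofNat_of_zero_le hd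
  have h2 := pv_two_mul_tri (k : Int)
  have h3 := pv_two_mul_triAux k
  have : calc_cost (k : Int) = pvTriAux k := by
    simp [calc_cost, pv_calc_loop k]
  rw [this]
  omega

theorem pv_ftc_eq (data : List Int) (c : Int) :
    find_total_cost data c = pvTotal data c := by
  simp only [find_total_cost, pvTotal]
  rw [PySem.List.foldl_add data (fun number => calc_cost |number - c|) 0]
  simp only [Int.zero_add]
  congr 1
  apply List.map_congr_left
  intro p _
  exact pv_calc_cost_eq _ (abs_nonneg _)

-- the discrete derivative of the cost function
def pvD (data : List Int) (c : Int) : Int :=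
  (data.map (fun p => (c - p) + (if p ≤ c then (1 : Int) else 0))).sum

theorem pv_tri_step (p c : Int) :
    pvTri |p - (c + 1)| - pvTri |p - c| = (c - p) + (if p ≤ c then (1 : Int) else 0) := by
  by_cases h : p ≤ c
  · rw [abs_of_nonpos (by omega : p - (c + 1) ≤ 0), abs_of_nonpos (by omega : p - c ≤ 0)]
    have h1 := pv_two_mul_tri (-(p - (c + 1)))
    have h2 := pv_two_mul_tri (-(p - c))
    have h3 : 2 * pvTri (-(p - (c + 1))) - 2 * pvTri (-(p - c)) = 2 * (c - p) + 2 := by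
      rw [h1, h2]; ring
    simp only [if_pos h]
    omega
  · rw [abs_of_nonneg (by omega : 0 ≤ p - (c + 1)), abs_of_nonneg (by omega : 0 ≤ p - c)]
    have h1 := pv_two_mul_tri (p - (c + 1))
    have h2 := pv_two_mul_tri (p - c)
    have h3 : 2 * pvTri (p - (c + 1)) - 2 * pvTri (p - c) = 2 * (c - p) := by
      rw [h1, h2]; ring
    simp only [if_neg h]
    omega

theorem pv_F_succ (data : List Int) (c : Int) :
    pvTotal data (c + 1) = pvTotal data c + pvD data c := by
  induction data with
  | nil => simp [pvTotal, pvD]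
  | cons p t ih =>
    simp only [pvTotal, pvD, List.map_cons, List.sum_cons] at *
    have := pv_tri_step p c
    linarith

-- pvD in closed form: n*c - S + #{p ≤ c}
theorem pv_D_eq (data : List Int) (c : Int) :
    pvD data c = (data.length : Int) * c - data.sum
      + (data.countP (fun p => decide (p ≤ c)) : Int) := by
  induction data with
  | nil => simp [pvD]
  | cons p t ih =>
    simp only [pvD, List.map_cons, List.sum_cons, List.countP_cons, List.length_cons,
      List.sum_cons] at *
    by_cases h : p ≤ c
    · simp only [h, decide_true]
      push_cast
      linarith [ih]
    · simp only [h, decide_false]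
      push_cast
      linarith [ih]

theorem pv_D_mono (data : List Int) {c c' : Int} (h : c ≤ c') :
    pvD data c ≤ pvD data c' := by
  rw [pv_D_eq, pv_D_eq]
  have hcnt : data.countP (fun p => decide (p ≤ c)) ≤ data.countP (fun p => decide (p ≤ c')) :=
    List.countP_mono_left (by intro x _ hx; simp only [decide_eq_true_eq] at *; omega)
  have hn : (0 : Int) ≤ (data.length : Int) * (c' - c) :=
    mul_nonneg (by positivity) (by omega)
  have : (data.length : Int) * c' = (data.length : Int) * c + (data.length : Int) * (c' - c) := by
    ring
  omega

-- F does not go below F t to the right of t once the derivative is ≥ 0 at t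
theorem pv_F_ge (data : List Int) (t : Int) (h0 : 0 ≤ pvD data t) (k : Nat) :
    pvTotal data t ≤ pvTotal data (t + k) := by
  induction k with
  | zero => simp
  | succ k ih =>
    have hstep := pv_F_succ data (t + k)
    have hm := pv_D_mono data (by omega : t ≤ t + (k : Int))
    have he : t + ((k : Nat) + 1 : Nat) = t + (k : Int) + 1 := by push_cast; ring
    rw [he, hstep]
    linarith

-- the plateau phase of A's scan: no update when nothing beats the current low
theorem pv_plateau (G : Int → Int) (l : List Int) (low pos : Int)
    (h : ∀ x ∈ l, ¬ G x < low) :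
    l.foldl (fun st x => let cost := G x; if cost < st.1 then (cost, x) else st) (low, pos)
      = (low, pos) := by
  induction l with
  | nil => rfl
  | cons x t ih =>
    simp only [List.foldl_cons]
    rw [if_neg (h x (by simp))]
    exact ih (fun y hy => h y (by simp [hy]))

-- the descent phase of A's scan: every step strictly improves, the state tracks x
theorem pv_descent (G : Int → Int) (k : Nat) : ∀ (a : Int),
    (∀ y, a ≤ y → y < a + k → G (y + 1) < G y) →
    (PySem.List.pyRange (a + 1) (a + k + 1) 1).foldl
      (fun st x => let cost := G x; if cost < st.1 then (cost, x) else st) (G a, a)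
      = (G (a + k), a + k) := by
  induction k with
  | zero =>
    intro a _
    push_cast
    rw [PySem.List.pyRange_one_eq_nil (by omega : a + 0 + 1 ≤ a + 1)]
    simp
  | succ k ih =>
    intro a h
    push_cast
    have ha : a + ((k : Int) + 1) = a + 1 + (k : Int) := by ring
    rw [ha]
    rw [PySem.List.pyRange_one_cons (by omega : a + 1 < a + 1 + (k : Int) + 1)]
    simp only [List.foldl_cons]
    rw [if_pos (h a (le_refl a) (by push_cast; omega))]
    exact ih (a + 1) (fun y h1 h2 => h y (by omega) (by omega))

-- sum bounds from elementwise bounds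
theorem pv_sum_le (data : List Int) (m : Int) (h : ∀ p ∈ data, p ≤ m) :
    data.sum ≤ (data.length : Int) * m := by
  induction data with
  | nil => simp
  | cons p t ih =>
    simp only [List.sum_cons, List.length_cons]
    have h1 := h p (by simp)
    have h2 := ih (fun q hq => h q (by simp [hq]))
    push_cast
    nlinarith

theorem pv_le_sum (data : List Int) (m : Int) (h : ∀ p ∈ data, m ≤ p) :
    (data.length : Int) * m ≤ data.sum := by
  induction data with
  | nil => simp
  | cons p t ih =>
    simp only [List.sum_cons, List.length_cons]
    have h1 := h p (by simp)
    have h2 := ih (fun q hq => h q (by simp [hq]))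
    push_cast
    nlinarith

-- D(fl-1) < 0 and D(ce) ≥ 0: the derivative brackets around floor/ceil of the mean
theorem pv_D_fl_neg (data : List Int) (hne : data ≠ []) :
    pvD data (PySem.Int.floordiv data.sum (data.length : Int) - 1) < 0 := by
  have hn : (0 : Int) < (data.length : Int) := by
    simpa using List.length_pos_iff.mpr hne
  set n : Int := (data.length : Int) with hn_def
  set S : Int := data.sum with hS_def
  set fl : Int := PySem.Int.floordiv S n with hfl_def
  have hfl := (PySem.Int.floordiv_eq_iff_of_pos hn).mp hfl_def.symm
  rw [pv_D_eq]
  have hcle := @List.countP_le_length Int (fun p => decide (p ≤ fl - 1)) data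
  by_cases hc : data.countP (fun p => decide (p ≤ fl - 1)) = data.length
  · have hall : ∀ p ∈ data, p ≤ fl - 1 := by
      intro p hp
      have := List.countP_eq_length.mp hc p hp
      simpa using this
    have hsum := pv_sum_le data (fl - 1) hall
    have he : (data.length : Int) * (fl - 1) = fl * n - n := by rw [← hn_def]; ring
    rw [← hS_def, he] at hsum
    linarith [hfl.1]
  · have hlt : data.countP (fun p => decide (p ≤ fl - 1)) < data.length := by omega
    have hcast : ((data.countP (fun p => decide (p ≤ fl - 1)) : Nat) : Int) ≤ n - 1 := by
      rw [hn_def]; omega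
    have he : n * (fl - 1) = fl * n - n := by ring
    rw [← hn_def, ← hS_def]
    linarith [hfl.1]

theorem pv_D_ce_nonneg (data : List Int) (hne : data ≠ []) :
    0 ≤ pvD data (-(PySem.Int.floordiv (-data.sum) (data.length : Int))) := by
  have hn : (0 : Int) < (data.length : Int) := by
    simpa using List.length_pos_iff.mpr hne
  set n : Int := (data.length : Int) with hn_def
  set S : Int := data.sum with hS_def
  set ce : Int := -(PySem.Int.floordiv (-S) n) with hce_def
  have hce := (PySem.Int.neg_floordiv_neg_eq_iff_of_pos hn).mp hce_def.symm
  rw [pv_D_eq]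
  have hcnt : (0 : Int) ≤ ((data.countP (fun p => decide (p ≤ ce)) : Nat) : Int) :=
    Int.natCast_nonneg _
  have he : n * ce = ce * n := by ring
  rw [← hn_def, ← hS_def]
  linarith [hce.2]

-- ===== VERDICT (by name: the statement is the Claim_ definition above) =====
theorem find_cheapest_position_spec : Claim_equal_find_cheapest_position := by
  intro data _ hpre
  unfold Spec_find_cheapest_position
  have hn : (0 : Int) < (data.length : Int) := by
    simpa using List.length_pos_iff.mpr hpre
  obtain ⟨mn, hmn⟩ : ∃ m, PySem.List.min? data (fun x => x) = some m := by
    rcases h : PySem.List.min? data (fun x => x) with _ | m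
    · exact absurd ((PySem.List.min?_eq_none_iff data _).mp h) hpre
    · exact ⟨m, rfl⟩
  obtain ⟨mx, hmx⟩ : ∃ m, PySem.List.max? data (fun x => x) = some m := by
    rcases h : PySem.List.max? data (fun x => x) with _ | m
    · exact absurd ((PySem.List.max?_eq_none_iff data _).mp h) hpre
    · exact ⟨m, rfl⟩
  have hmnp : ∀ p ∈ data, mn ≤ p := PySem.List.min?_isMin hmn
  have hmxp : ∀ p ∈ data, p ≤ mx := PySem.List.max?_isMax hmx
  set n : Int := (data.length : Int) with hn_def
  set S : Int := data.sum with hS_def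
  set fl : Int := PySem.Int.floordiv S n with hfl_def
  set ce : Int := -(PySem.Int.floordiv (-S) n) with hce_def
  have hfl := (PySem.Int.floordiv_eq_iff_of_pos hn).mp hfl_def.symm
  have hce := (PySem.Int.neg_floordiv_neg_eq_iff_of_pos hn).mp hce_def.symm
  have hSmn : n * mn ≤ S := pv_le_sum data mn hmnp
  have hSmx : S ≤ n * mx := pv_sum_le data mx hmxp
  have h_fl_le_ce : fl ≤ ce := by
    have h1 : fl * n ≤ ce * n := le_trans hfl.1 hce.2
    nlinarith
  have h_ce_le : ce ≤ fl + 1 := by nlinarith [hce.1, hfl.2]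
  have hmn_fl : mn ≤ fl := by nlinarith [hfl.2]
  have hce_mx : ce ≤ mx := by nlinarith [hce.1]
  have hDfl1 : pvD data (fl - 1) < 0 := pv_D_fl_neg data hpre
  have hDce : 0 ≤ pvD data ce := pv_D_ce_nonneg data hpre
  -- A's scan equals the fold of the comparison step over [min+1, max]
  have hstep : (fun (st : Int × Int) (x : Int) =>
        let cost := find_total_cost data x
        if cost < st.1 then (cost, x) else st)
      = (fun (st : Int × Int) (x : Int) =>
        let cost := pvTotal data x
        if cost < st.1 then (cost, x) else st) := by
    funext st x
    simp only [pv_ftc_eq]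
  have hA : find_cheapest_position data
      = (PySem.List.pyRange (mn + 1) (mx + 1) 1).foldl
          (fun st x =>
            let cost := pvTotal data x
            if cost < st.1 then (cost, x) else st)
          (pvTotal data mn, mn) := by
    unfold find_cheapest_position
    rw [hmn, hmx]
    simp only [Option.getD_some]
    rw [hstep, pv_ftc_eq]
  have hB : find_cheapest_position_alt data
      = if pvTotal data ce < pvTotal data fl then (pvTotal data ce, ce)
        else (pvTotal data fl, fl) := rfl
  -- generic assembly: the scan lands on x0
  have hmain : ∀ x0 : Int, mn ≤ x0 → x0 ≤ mx →
      (∀ y, y < x0 → pvD data y < 0) → 0 ≤ pvD data x0 →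
      (PySem.List.pyRange (mn + 1) (mx + 1) 1).foldl
          (fun st x =>
            let cost := pvTotal data x
            if cost < st.1 then (cost, x) else st)
          (pvTotal data mn, mn) = (pvTotal data x0, x0) := by
    intro x0 h1 h2 hdec h0
    rw [PySem.List.pyRange_one_append (mn + 1) (x0 + 1) (mx + 1) (by omega) (by omega),
      List.foldl_append]
    have hdesc := pv_descent (pvTotal data) (x0 - mn).toNat mn (by
      intro y hy1 hy2
      have : y < x0 := by omega
      have hD := hdec y this
      have := pv_F_succ data y
      linarith)
    have hk : mn + ((x0 - mn).toNat : Int) = x0 := by omega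
    rw [hk] at hdesc
    rw [hdesc]
    apply pv_plateau
    intro x hx
    obtain ⟨hx1, hx2⟩ := PySem.List.mem_pyRange_one.mp hx
    have hge := pv_F_ge data x0 h0 (x - x0).toNat
    rw [show x0 + ((x - x0).toNat : Int) = x by omega] at hge
    omega
  rw [hA, hB]
  by_cases hcase : pvTotal data ce < pvTotal data fl
  · -- the ceiling strictly wins: then ce = fl + 1 and the derivative is < 0 up to fl
    have hne : ce ≠ fl := by
      intro h; rw [h] at hcase; exact lt_irrefl _ hcase
    have hec : ce = fl + 1 := by omega
    have hDfl : pvD data fl < 0 := by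
      have hs := pv_F_succ data fl
      rw [← hec] at hs
      linarith
    rw [if_pos hcase]
    exact hmain ce (by omega) hce_mx
      (by
        intro y hy
        have hy' : y ≤ fl := by omega
        rcases lt_or_eq_of_le hy' with h | h
        · exact lt_of_le_of_lt (pv_D_mono data (by omega : y ≤ fl - 1)) hDfl1
        · rw [h]; exact hDfl)
      hDce
  · -- the floor (leftmost) wins: the derivative is ≥ 0 from fl on
    have h0 : 0 ≤ pvD data fl := by
      rcases eq_or_lt_of_le h_fl_le_ce with h | h
      · rw [h]; exact hDce
      · have hec : ce = fl + 1 := by omega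
        have hs := pv_F_succ data fl
        rw [← hec] at hs
        linarith
    rw [if_neg hcase]
    exact hmain fl hmn_fl (by omega)
      (fun y hy => lt_of_le_of_lt (pv_D_mono data (by omega : y ≤ fl - 1)) hDfl1)
      h0
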